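-- pv_equiv track=rewrite | github.com/aroramanish2009/notes | pymisc/aoc-2023/dec12/script.py | data_mass3
-- ===== SOURCE A (Python) =====
-- def data_mass3(ListofList):
--     for i in reversed(range(len(ListofList))):
--         #print (ListofList)
--         #print (ListofList[i],ListofList[i + 1],i,len(ListofList) - 1)
--         if ListofList[i] == ListofList[i - 1]:
--             if i == len(ListofList) - 1:
--                 return i
--             elif i == 1:
--                 return 1
--             else:
--                 aboveLine = i - 2
--                 belowLine = i + 1
--                 while 0 <= aboveLine and belowLine <= len(ListofList) - 1:
--                     if ListofList[aboveLine] == ListofList[belowLine]: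
--                         if belowLine == len(ListofList) - 1:
--                             return i
--                         elif aboveLine == 0:
--                             return i
--                         aboveLine -= 1
--                         belowLine += 1
--                     else:
--                         break
--     return 0
-- ===== SOURCE B (Python) =====
-- def data_mass3(ListofList):
--     n = len(ListofList)
--     for i in range(n - 1, 0, -1):
--         k = min(i, n - i)
--         if ListofList[i - k:i] == ListofList[i:i + k][::-1]:
--             return i
--     return 0
-- ===== Notes on version B (the rewrite author's own statement) =====
-- stated objective: simpler
-- what changed: Replaces A's three-way case split and guarded outward while-loop expansion per candidate line with a single slice-vs-reversed-slice comparison per line.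
import Mathlib
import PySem

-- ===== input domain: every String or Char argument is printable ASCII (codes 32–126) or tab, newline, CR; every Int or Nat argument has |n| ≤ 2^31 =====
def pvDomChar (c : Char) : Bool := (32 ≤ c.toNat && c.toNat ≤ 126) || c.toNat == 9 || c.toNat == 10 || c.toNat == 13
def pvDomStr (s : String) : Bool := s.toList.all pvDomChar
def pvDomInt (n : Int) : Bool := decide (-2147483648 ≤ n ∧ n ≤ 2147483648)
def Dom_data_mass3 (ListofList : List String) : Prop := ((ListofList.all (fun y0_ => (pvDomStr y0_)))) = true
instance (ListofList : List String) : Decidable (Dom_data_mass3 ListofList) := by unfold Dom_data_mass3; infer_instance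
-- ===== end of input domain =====

-- B replaces A's case split plus outward while-loop expansion by one slice-vs-reversed-slice
-- comparison per candidate line (objective: simpler; same asymptotic cost).

-- ===== PORT A =====
-- the inner 'while 0 <= aboveLine and belowLine <= len - 1' loop;
-- 'some i' = 'return i', 'none' = break or guard failure (the outer for-loop continues)
def aWhile (xs : List String) (i : Int) (above below : Int) : Option Int :=
  if h : 0 ≤ above ∧ below ≤ (xs.length : Int) - 1 then
    if PySem.List.pyGet? xs above = PySem.List.pyGet? xs below then
      if below = (xs.length : Int) - 1 then some i
      else if above = 0 then some i
      else aWhile xs i (above - 1) (below + 1)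
    else none
  else none
termination_by (above + 1).toNat
decreasing_by omega

-- one iteration of the outer 'for i in reversed(range(len(ListofList)))' body
def aBody (xs : List String) (i : Nat) : Option Int :=
  if PySem.List.pyGet? xs (i : Int) = PySem.List.pyGet? xs ((i : Int) - 1) then
    if (i : Int) = (xs.length : Int) - 1 then some (i : Int)
    else if i = 1 then some 1
    else aWhile xs (i : Int) ((i : Int) - 2) ((i : Int) + 1)
  else none

-- the outer loop: aLoop xs (k+1) runs the body at i = k, k-1, …, 0
def aLoop (xs : List String) : Nat → Int
  | 0 => 0
  | k + 1 =>
    match aBody xs k with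
    | some r => r
    | none => aLoop xs k

def data_mass3 (ListofList : List String) : Int := aLoop ListofList ListofList.length

-- ===== PORT B =====
-- ListofList[i-k:i] == ListofList[i:i+k][::-1]  ('[::-1]' is reversal, PySem.List.slice?_none_none_neg_one)
def bCheck (xs : List String) (i : Nat) : Bool :=
  let k : Nat := min i (xs.length - i)
  decide (PySem.List.slice xs (some ((i : Int) - (k : Int))) (some (i : Int)) =
          (PySem.List.slice xs (some (i : Int)) (some ((i : Int) + (k : Int)))).reverse)

-- 'for i in range(n - 1, 0, -1)': bLoop xs m runs i = m, m-1, …, 1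
def bLoop (xs : List String) : Nat → Int
  | 0 => 0
  | i + 1 => if bCheck xs (i + 1) then ((i : Int) + 1) else bLoop xs i

def data_mass3_alt (ListofList : List String) : Int := bLoop ListofList (ListofList.length - 1)

-- ===== PRECONDITION & SPEC =====
def Spec_data_mass3 (ListofList : List String) (out : Int) : Prop := out = data_mass3_alt ListofList
instance (ListofList : List String) (out : Int) : Decidable (Spec_data_mass3 ListofList out) := by unfold Spec_data_mass3; infer_instance

-- ===== CLAIM (what is proved, stated in full; the proofs are below) =====
def Claim_equal_data_mass3 : Prop := ∀ (ListofList : List String), Dom_data_mass3 ListofList → Spec_data_mass3 ListofList (data_mass3 ListofList)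

-- ===== LEMMAS AND PROOFS =====

-- the while loop returns 'some i' iff the outward pairs match all the way to a boundary
lemma aWhile_eq (xs : List String) (i : Int) :
    ∀ (a b : Nat), b < xs.length →
    aWhile xs i (a : Int) (b : Int) =
      (if ∀ t < min a (xs.length - 1 - b) + 1, xs[a - t]? = xs[b + t]? then some i else none) := by
  intro a
  induction a with
  | zero =>
    intro b hb
    rw [aWhile, dif_pos (by omega : (0:Int) ≤ ((0:Nat):Int) ∧ ((b:Nat):Int) ≤ (xs.length:Int) - 1)]
    rw [PySem.List.pyGet?_natCast, PySem.List.pyGet?_natCast]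
    by_cases he : xs[(0:Nat)]? = xs[b]?
    · rw [if_pos he]
      have hcond : ∀ t < min 0 (xs.length - 1 - b) + 1, xs[0 - t]? = xs[b + t]? := by
        intro t ht
        have ht0 : t = 0 := by omega
        subst ht0; simpa using he
      rw [if_pos hcond]
      by_cases hb1 : ((b:Nat):Int) = (xs.length:Int) - 1
      · rw [if_pos hb1]
      · rw [if_neg hb1, if_pos (by norm_num : ((0:Nat):Int) = 0)]
    · rw [if_neg he, if_neg]
      intro hc
      exact he (by simpa using hc 0 (by omega))
  | succ a ih =>
    intro b hb
    rw [aWhile, dif_pos (by omega : (0:Int) ≤ (((a+1):Nat):Int) ∧ ((b:Nat):Int) ≤ (xs.length:Int) - 1)]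
    rw [PySem.List.pyGet?_natCast, PySem.List.pyGet?_natCast]
    by_cases he : xs[a+1]? = xs[b]?
    · rw [if_pos he]
      by_cases hbl : ((b:Nat):Int) = (xs.length:Int) - 1
      · rw [if_pos hbl]
        have hbn : b = xs.length - 1 := by omega
        have hcond : ∀ t < min (a+1) (xs.length - 1 - b) + 1, xs[a + 1 - t]? = xs[b + t]? := by
          intro t ht
          have ht0 : t = 0 := by omega
          subst ht0; simpa using he
        rw [if_pos hcond]
      · rw [if_neg hbl, if_neg (by omega : ¬ (((a+1:Nat)):Int) = 0)]
        have hbn : b + 1 < xs.length := by omega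
        have e1 : (((a+1:Nat)):Int) - 1 = ((a:Nat):Int) := by omega
        have e2 : ((b:Nat):Int) + 1 = (((b+1:Nat)):Int) := by omega
        rw [e1, e2, ih (b+1) hbn]
        have hiff : (∀ t < min a (xs.length - 1 - (b+1)) + 1, xs[a - t]? = xs[(b+1) + t]?) ↔
            (∀ t < min (a+1) (xs.length - 1 - b) + 1, xs[a + 1 - t]? = xs[b + t]?) := by
          constructor
          · intro h t ht
            rcases Nat.eq_zero_or_pos t with rfl | htp
            · simpa using he
            · obtain ⟨s, rfl⟩ : ∃ s, t = s + 1 := ⟨t - 1, by omega⟩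
              have hs := h s (by omega)
              have e3 : a + 1 - (s+1) = a - s := by omega
              have e4 : b + (s+1) = (b+1) + s := by omega
              rw [e3, e4]; exact hs
          · intro h t ht
            have hs := h (t+1) (by omega)
            have e3 : a + 1 - (t+1) = a - t := by omega
            have e4 : b + (t+1) = (b+1) + t := by omega
            rw [e3, e4] at hs; exact hs
        rw [if_congr hiff rfl rfl]
    · rw [if_neg he, if_neg]
      intro hc
      exact he (by simpa using hc 0 (by omega))

-- one outer-body step returns 'some i' iff all mirror pairs around the line at i match
lemma aBody_eq (xs : List String) (i : Nat) (h1 : 1 ≤ i) (h2 : i < xs.length) :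
    aBody xs i =
      (if ∀ j < min i (xs.length - i), xs[i - 1 - j]? = xs[i + j]? then some (i : Int) else none) := by
  unfold aBody
  have e0 : ((i:Nat):Int) - 1 = (((i-1:Nat)):Int) := by omega
  rw [PySem.List.pyGet?_natCast, e0, PySem.List.pyGet?_natCast]
  by_cases he : xs[i]? = xs[i-1]?
  · rw [if_pos he]
    by_cases hil : ((i:Nat):Int) = (xs.length:Int) - 1
    · rw [if_pos hil]
      have hin : i = xs.length - 1 := by omega
      have hcond : ∀ j < min i (xs.length - i), xs[i - 1 - j]? = xs[i + j]? := by
        intro j hj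
        have hj0 : j = 0 := by omega
        subst hj0; simpa using he.symm
      rw [if_pos hcond]
    · rw [if_neg hil]
      have hin : i + 1 < xs.length := by omega
      by_cases hi1 : i = 1
      · subst hi1
        have hcond : ∀ j < min 1 (xs.length - 1), xs[1 - 1 - j]? = xs[1 + j]? := by
          intro j hj
          have hj0 : j = 0 := by omega
          subst hj0; simpa using he.symm
        rw [if_pos rfl, if_pos hcond]
        norm_num
      · rw [if_neg hi1]
        have hi2 : 2 ≤ i := by omega
        have e1 : ((i:Nat):Int) - 2 = (((i-2:Nat)):Int) := by omega
        have e2 : ((i:Nat):Int) + 1 = (((i+1:Nat)):Int) := by omega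
        rw [e1, e2, aWhile_eq xs (i:Int) (i-2) (i+1) hin]
        have hiff : (∀ t < min (i-2) (xs.length - 1 - (i+1)) + 1, xs[(i-2) - t]? = xs[(i+1) + t]?) ↔
            (∀ j < min i (xs.length - i), xs[i - 1 - j]? = xs[i + j]?) := by
          constructor
          · intro h j hj
            rcases Nat.eq_zero_or_pos j with rfl | hp
            · simpa using he.symm
            · obtain ⟨s, rfl⟩ : ∃ s, j = s + 1 := ⟨j - 1, by omega⟩
              have hs := h s (by omega)
              have e3 : i - 1 - (s+1) = i - 2 - s := by omega
              have e4 : i + (s+1) = (i+1) + s := by omega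
              rw [e3, e4]; exact hs
          · intro h t ht
            have hs := h (t+1) (by omega)
            have e3 : i - 1 - (t+1) = i - 2 - t := by omega
            have e4 : i + (t+1) = (i+1) + t := by omega
            rw [e3, e4] at hs; exact hs
        rw [if_congr hiff rfl rfl]
  · rw [if_neg he, if_neg]
    intro hc
    have h0 := hc 0 (by omega)
    simp only [Nat.sub_zero, Nat.add_zero] at h0
    exact he h0.symm

-- the slice comparison tests exactly the same mirror pairs
lemma bCheck_iff (xs : List String) (i : Nat) (h1 : 1 ≤ i) (h2 : i < xs.length) :
    bCheck xs i = true ↔ ∀ j < min i (xs.length - i), xs[i - 1 - j]? = xs[i + j]? := by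
  have hbc : bCheck xs i =
      decide (PySem.List.slice xs (some ((i : Int) - ((min i (xs.length - i) : Nat) : Int))) (some (i : Int)) =
        (PySem.List.slice xs (some (i : Int)) (some ((i : Int) + ((min i (xs.length - i) : Nat) : Int)))).reverse) := rfl
  set k := min i (xs.length - i) with hk
  have hk1 : 1 ≤ k := by omega
  have hki : k ≤ i := by omega
  have hkn : i + k ≤ xs.length := by omega
  have e1 : (i : Int) - (k : Int) = (((i - k : Nat)) : Int) := by omega
  have e2 : (i : Int) + (k : Int) = (((i + k : Nat)) : Int) := by omega
  rw [hbc, decide_eq_true_iff, e1, e2, PySem.List.slice_natCast, PySem.List.slice_natCast]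
  have e3 : i - (i - k) = k := by omega
  have e4 : i + k - i = k := by omega
  rw [e3, e4]
  have hl2 : ((xs.drop i).take k).length = k := by simp; omega
  constructor
  · intro heq j hj
    have hj' : k - 1 - j < k := by omega
    have hgj := congrArg (fun l => l[k - 1 - j]?) heq
    simp only [] at hgj
    rw [List.getElem?_take_of_lt hj', List.getElem?_drop,
        List.getElem?_reverse (by omega : k - 1 - j < ((xs.drop i).take k).length), hl2,
        List.getElem?_take_of_lt (by omega : k - 1 - (k - 1 - j) < k), List.getElem?_drop] at hgj
    have e5 : i - k + (k - 1 - j) = i - 1 - j := by omega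
    have e6 : i + (k - 1 - (k - 1 - j)) = i + j := by omega
    rw [e5, e6] at hgj
    exact hgj
  · intro hp
    apply List.ext_getElem?
    intro j
    by_cases hj : j < k
    · rw [List.getElem?_take_of_lt hj, List.getElem?_drop,
          List.getElem?_reverse (by omega : j < ((xs.drop i).take k).length), hl2,
          List.getElem?_take_of_lt (by omega : k - 1 - j < k), List.getElem?_drop]
      have hjp := hp (k - 1 - j) (by omega)
      have e5 : i - 1 - (k - 1 - j) = i - k + j := by omega
      have e6 : i + (k - 1 - j) = i + (k - 1 - j) := rfl
      rw [e5] at hjp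
      exact hjp
    · rw [List.getElem?_eq_none (by simp; omega : ((xs.drop (i - k)).take k).length ≤ j),
          List.getElem?_eq_none (by simp [hl2]; omega : ((xs.drop i).take k).reverse.length ≤ j)]

lemma aBody_zero (xs : List String) (hn : 2 ≤ xs.length) : aBody xs 0 = none := by
  unfold aBody
  split
  · rw [if_neg (by omega : ¬ (((0:Nat)):Int) = (xs.length:Int) - 1),
        if_neg (by omega : ¬ (0:Nat) = 1)]
    rw [aWhile, dif_neg (by omega)]
  · rfl

lemma loop_eq (xs : List String) (hn : 2 ≤ xs.length) :
    ∀ m, m < xs.length → aLoop xs (m + 1) = bLoop xs m := by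
  intro m
  induction m with
  | zero =>
    intro _
    show aLoop xs 1 = bLoop xs 0
    simp [aLoop, aBody_zero xs hn, bLoop]
  | succ m ih =>
    intro hm
    have hb := aBody_eq xs (m + 1) (by omega) hm
    rcases Bool.eq_false_or_eq_true (bCheck xs (m + 1)) with hT | hF
    · have hc : ∀ j < min (m+1) (xs.length - (m+1)), xs[m + 1 - 1 - j]? = xs[m + 1 + j]? :=
        (bCheck_iff xs (m+1) (by omega) hm).mp hT
      rw [if_pos hc] at hb
      show aLoop xs (m + 1 + 1) = bLoop xs (m + 1)
      rw [aLoop, hb, bLoop, if_pos hT]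
      push_cast
      ring
    · have hc : ¬ (∀ j < min (m+1) (xs.length - (m+1)), xs[m + 1 - 1 - j]? = xs[m + 1 + j]?) := by
        rw [← bCheck_iff xs (m+1) (by omega) hm]
        simp [hF]
      rw [if_neg hc] at hb
      show aLoop xs (m + 1 + 1) = bLoop xs (m + 1)
      rw [aLoop, hb, bLoop, if_neg (by simp [hF])]
      exact ih (by omega)

-- ===== VERDICT (by name: the statement is the Claim_ definition above) =====
theorem data_mass3_spec : Claim_equal_data_mass3 := by
  intro xs _
  unfold Spec_data_mass3 data_mass3 data_mass3_alt
  rcases xs with _ | ⟨a, _ | ⟨b, t⟩⟩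
  · rfl
  · -- singleton: A returns at i = 0, B's empty loop returns 0
    show aLoop [a] 1 = bLoop [a] 0
    rw [aLoop, aBody]
    norm_num [PySem.List.pyGet?_natCast, PySem.List.pyGet?_neg_one]
    rfl
  · have hn : 2 ≤ (a :: b :: t).length := by simp
    have h := loop_eq (a :: b :: t) hn ((a :: b :: t).length - 1) (by simp)
    have e : (a :: b :: t).length - 1 + 1 = (a :: b :: t).length := by simp
    rw [e] at h
    exact h
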